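-- pv_equiv track=rewrite | github.com/nailec1911/advent-of-code | 2024/day_08/day_08.py | loop_dir
-- ===== SOURCE A (Python) =====
-- from math import gcd
--
-- def loop_dir(ox, oy, x, y, size_x, size_y):
--     diff = gcd(x, y)
--     xd,yd = x // diff, y // diff
--     res = []
--     i = 0
--     while (0 <= ox + xd * i < size_x and 0 <= oy + yd * i < size_y):
--         res.append([ox + xd * i, oy + yd * i])
--         i += 1
--     return res
-- ===== SOURCE B (Python) =====
-- from math import gcd
--
-- def loop_dir(ox, oy, x, y, size_x, size_y):
--     diff = gcd(x, y)
--     xd, yd = x // diff, y // diff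
--
--     def steps(o, d, size):
--         # number of consecutive i = 0,1,2,... with 0 <= o + d*i < size on this axis
--         # (None means: unbounded on this axis)
--         if not (0 <= o < size):
--             return 0
--         if d == 0:
--             return None
--         if d > 0:
--             return -((o - size) // d)   # ceil((size - o) / d)
--         return o // (-d) + 1
--
--     ns = [s for s in (steps(ox, xd, size_x), steps(oy, yd, size_y)) if s is not None]
--     n = min(ns)
--     return [[ox + xd * i, oy + yd * i] for i in range(n)]
-- ===== Notes on version B (the rewrite author's own statement) =====
-- stated objective: alternative
-- what changed: B computes the trip length up front: per axis a closed-form count of steps that stay inside [0, size) (constant/positive/negative direction handled by integer ceiling/floor division), takes the minimum over the two axes and emits the points with one range comprehension, instead of A's while loop that re-tests both bounds at every point.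
import Mathlib
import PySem

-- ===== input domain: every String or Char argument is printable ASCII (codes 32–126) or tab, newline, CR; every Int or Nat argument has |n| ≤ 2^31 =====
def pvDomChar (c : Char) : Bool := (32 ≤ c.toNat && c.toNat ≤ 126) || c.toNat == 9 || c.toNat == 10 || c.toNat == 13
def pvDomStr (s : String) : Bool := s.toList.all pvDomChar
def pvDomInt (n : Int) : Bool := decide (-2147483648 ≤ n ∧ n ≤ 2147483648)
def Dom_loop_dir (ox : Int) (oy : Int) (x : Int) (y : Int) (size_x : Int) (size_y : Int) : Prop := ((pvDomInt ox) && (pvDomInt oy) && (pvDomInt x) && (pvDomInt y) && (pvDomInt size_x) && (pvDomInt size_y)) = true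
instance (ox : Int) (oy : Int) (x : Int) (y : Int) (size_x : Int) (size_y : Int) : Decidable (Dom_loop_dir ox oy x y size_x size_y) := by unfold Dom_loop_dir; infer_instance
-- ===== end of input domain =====

-- B replaces A's point-by-point bounds-testing loop by a closed-form step count per axis
-- (objective: alternative decomposition; cost is dominated by building the output either way).

-- ===== PORT A =====
-- A's while loop; fuel is only a totality device (inside Pre_ it is provably sufficient,
-- since the nonzero direction component leaves [0, size) after at most size steps).
def loopDirGo (ox oy xd yd sx sy : Int) (i : Int) : Nat → List (List Int)
  | 0 => []
  | fuel + 1 =>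
    if 0 ≤ ox + xd * i ∧ ox + xd * i < sx ∧ 0 ≤ oy + yd * i ∧ oy + yd * i < sy then
      [ox + xd * i, oy + yd * i] :: loopDirGo ox oy xd yd sx sy (i + 1) fuel
    else []

def loop_dir (ox : Int) (oy : Int) (x : Int) (y : Int) (size_x : Int) (size_y : Int) : List (List Int) :=
  let diff : Int := Int.gcd x y
  let xd := PySem.Int.floordiv x diff
  let yd := PySem.Int.floordiv y diff
  loopDirGo ox oy xd yd size_x size_y 0 (size_x.toNat + size_y.toNat + 1)

-- ===== PORT B =====
-- Source B's helper `steps`: consecutive i = 0,1,2,... with 0 ≤ o + d*i < size (none = unbounded)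
def stepsAxis (o d size : Int) : Option Int :=
  if ¬ (0 ≤ o ∧ o < size) then some 0
  else if d = 0 then none
  else if 0 < d then some (-(PySem.Int.floordiv (o - size) d))
  else some (PySem.Int.floordiv o (-d) + 1)

def loop_dir_alt (ox : Int) (oy : Int) (x : Int) (y : Int) (size_x : Int) (size_y : Int) : List (List Int) :=
  let diff : Int := Int.gcd x y
  let xd := PySem.Int.floordiv x diff
  let yd := PySem.Int.floordiv y diff
  let ns := ([stepsAxis ox xd size_x, stepsAxis oy yd size_y]).filterMap id
  let n := (ns.min?).getD 0  -- min(ns); `getD 0` is a totality guard (ns ≠ [] inside Pre_)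
  (List.range n.toNat).map (fun (i : Nat) => [ox + xd * (i : Int), oy + yd * (i : Int)])

-- ===== PRECONDITION & SPEC =====
-- Pre_ excludes exactly x = 0 ∧ y = 0, where gcd(x, y) = 0 and both A and B raise ZeroDivisionError.
def Pre_loop_dir (ox : Int) (oy : Int) (x : Int) (y : Int) (size_x : Int) (size_y : Int) : Prop :=
  ¬ (x = 0 ∧ y = 0)
instance (ox : Int) (oy : Int) (x : Int) (y : Int) (size_x : Int) (size_y : Int) : Decidable (Pre_loop_dir ox oy x y size_x size_y) := by unfold Pre_loop_dir; infer_instance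

def pvWitness_loop_dir : Int × Int × Int × Int × Int × Int := (0, 0, 1, 2, 10, 10)

def Spec_loop_dir (ox : Int) (oy : Int) (x : Int) (y : Int) (size_x : Int) (size_y : Int) (out : List (List Int)) : Prop := out = loop_dir_alt ox oy x y size_x size_y
instance (ox : Int) (oy : Int) (x : Int) (y : Int) (size_x : Int) (size_y : Int) (out : List (List Int)) : Decidable (Spec_loop_dir ox oy x y size_x size_y out) := by unfold Spec_loop_dir; infer_instance

-- ===== CLAIM (what is proved, stated in full; the proofs are below) =====
def Claim_equal_loop_dir : Prop := ∀ (ox : Int) (oy : Int) (x : Int) (y : Int) (size_x : Int) (size_y : Int), Dom_loop_dir ox oy x y size_x size_y → Pre_loop_dir ox oy x y size_x size_y → Spec_loop_dir ox oy x y size_x size_y (loop_dir ox oy x y size_x size_y)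

-- ===== LEMMAS AND PROOFS =====

lemma steps_nonneg {o d size H : Int} (h : stepsAxis o d size = some H) : 0 ≤ H := by
  unfold stepsAxis at h
  split_ifs at h with h1 h2 h3
  · injection h with h; subst h
    rw [PySem.Int.floordiv_eq_ediv_of_pos h3]
    have h4 := Int.ediv_lt_iff_lt_mul (a := o - size) (b := 0) h3
    omega
  · injection h with h; subst h
    have hd : 0 < -d := by omega
    have : 0 ≤ o / (-d) := Int.ediv_nonneg (by omega) (by omega)
    rw [PySem.Int.floordiv_eq_ediv_of_pos hd]
    omega
  · injection h with h; omega

lemma steps_ok_of_lt {o d size H : Int} (h : stepsAxis o d size = some H)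
    {i : Int} (hi : 0 ≤ i) (hlt : i < H) : 0 ≤ o + d * i ∧ o + d * i < size := by
  unfold stepsAxis at h
  split_ifs at h with h1 h2 h3
  · injection h with h; subst h
    rw [PySem.Int.floordiv_eq_ediv_of_pos h3] at hlt
    have h4 : (o - size) / d < -i := by omega
    have h5 : o - size < -i * d := (Int.ediv_lt_iff_lt_mul h3).mp h4
    have h6 : 0 ≤ d * i := mul_nonneg (le_of_lt h3) hi
    constructor <;> nlinarith [h1.1, h1.2]
  · injection h with h; subst h
    have hd : 0 < -d := by omega
    rw [PySem.Int.floordiv_eq_ediv_of_pos hd] at hlt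
    have h4 : i ≤ o / (-d) := by omega
    have h5 : i * (-d) ≤ o := (Int.le_ediv_iff_mul_le hd).mp h4
    have h6 : d * i ≤ 0 := by nlinarith
    constructor <;> nlinarith [h1.1, h1.2]
  · injection h with h; omega

lemma steps_stop {o d size H : Int} (h : stepsAxis o d size = some H) :
    ¬ (0 ≤ o + d * H ∧ o + d * H < size) := by
  unfold stepsAxis at h
  split_ifs at h with h1 h2 h3
  · injection h with h; subst h
    rw [PySem.Int.floordiv_eq_ediv_of_pos h3]
    have h5 : (o - size) / d * d ≤ o - size := Int.ediv_mul_le _ (by omega)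
    intro hc
    nlinarith [hc.2]
  · injection h with h; subst h
    have hd : 0 < -d := by omega
    rw [PySem.Int.floordiv_eq_ediv_of_pos hd]
    have h5 : o < (o / (-d) + 1) * (-d) := Int.lt_ediv_add_one_mul_self o hd
    intro hc
    nlinarith [hc.1]
  · injection h with h; subst h
    simpa using h1

lemma steps_le {o d size H : Int} (h : stepsAxis o d size = some H) : H.toNat ≤ size.toNat := by
  unfold stepsAxis at h
  split_ifs at h with h1 h2 h3
  · injection h with h; subst h
    rw [PySem.Int.floordiv_eq_ediv_of_pos h3]
    have h4 : (o - size) * d ≤ o - size := by nlinarith [h1.1, h1.2]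
    have h5 : o - size ≤ (o - size) / d := (Int.le_ediv_iff_mul_le h3).mpr h4
    omega
  · injection h with h; subst h
    have hd : 0 < -d := by omega
    rw [PySem.Int.floordiv_eq_ediv_of_pos hd]
    have h5 : o / (-d) ≤ o := Int.ediv_le_self _ (by omega)
    omega
  · injection h with h; omega

lemma go_eq (ox oy xd yd sx sy : Int) (N : Nat)
    (hok : ∀ k : Nat, k < N →
      (0 ≤ ox + xd * (k : Int) ∧ ox + xd * (k : Int) < sx ∧ 0 ≤ oy + yd * (k : Int) ∧ oy + yd * (k : Int) < sy))
    (hstop : ¬ (0 ≤ ox + xd * (N : Int) ∧ ox + xd * (N : Int) < sx ∧ 0 ≤ oy + yd * (N : Int) ∧ oy + yd * (N : Int) < sy)) :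
    ∀ (fuel k : Nat), N ≤ k + fuel → k ≤ N →
      loopDirGo ox oy xd yd sx sy (k : Int) fuel
        = (List.range (N - k)).map (fun j => [ox + xd * ((k + j : Nat) : Int), oy + yd * ((k + j : Nat) : Int)]) := by
  intro fuel
  induction fuel with
  | zero =>
    intro k h1 h2
    have hk : k = N := by omega
    subst hk
    simp [loopDirGo]
  | succ f ih =>
    intro k h1 h2
    by_cases hk : k < N
    · have hc := hok k hk
      simp only [loopDirGo]
      rw [if_pos hc]
      have hNk : N - k = (N - (k + 1)) + 1 := by omega
      rw [hNk, List.range_succ_eq_map, List.map_cons, List.map_map]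
      refine List.cons_eq_cons.mpr ⟨by push_cast; ring_nf, ?_⟩
      have hcast : ((k : Int) + 1) = ((k + 1 : Nat) : Int) := by push_cast; ring
      rw [hcast, ih (k + 1) (by omega) (by omega)]
      apply List.map_congr_left
      intro j hj
      simp only [Function.comp, Nat.succ_eq_add_one]
      push_cast
      ring_nf
    · have hkN : k = N := by omega
      subst hkN
      simp only [loopDirGo]
      rw [if_neg hstop]
      simp

lemma steps_none {o d size : Int} (h : stepsAxis o d size = none) :
    d = 0 ∧ 0 ≤ o ∧ o < size := by
  unfold stepsAxis at h
  split_ifs at h with h1 h2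
  exact ⟨h2, by omega⟩

lemma core_of (ox oy xd yd sx sy : Int) (N : Nat)
    (hok : ∀ k : Nat, k < N →
      (0 ≤ ox + xd * (k : Int) ∧ ox + xd * (k : Int) < sx ∧ 0 ≤ oy + yd * (k : Int) ∧ oy + yd * (k : Int) < sy))
    (hstop : ¬ (0 ≤ ox + xd * (N : Int) ∧ ox + xd * (N : Int) < sx ∧ 0 ≤ oy + yd * (N : Int) ∧ oy + yd * (N : Int) < sy))
    (hfuel : N ≤ sx.toNat + sy.toNat + 1) :
    loopDirGo ox oy xd yd sx sy 0 (sx.toNat + sy.toNat + 1)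
      = (List.range N).map (fun (i : Nat) => [ox + xd * (i : Int), oy + yd * (i : Int)]) := by
  have h := go_eq ox oy xd yd sx sy N hok hstop (sx.toNat + sy.toNat + 1) 0 (by omega) (by omega)
  simp only [Nat.cast_zero, Nat.sub_zero, Nat.zero_add] at h
  exact h

lemma main_core (ox oy xd yd sx sy : Int) (hne : xd ≠ 0 ∨ yd ≠ 0) :
    loopDirGo ox oy xd yd sx sy 0 (sx.toNat + sy.toNat + 1)
      = (List.range (((([stepsAxis ox xd sx, stepsAxis oy yd sy].filterMap id).min?).getD 0).toNat)).map
          (fun (i : Nat) => [ox + xd * (i : Int), oy + yd * (i : Int)]) := by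
  rcases hsa : stepsAxis ox xd sx with _ | a
  · rcases hsb : stepsAxis oy yd sy with _ | b
    · rcases steps_none hsa with ⟨hx0, -⟩
      rcases steps_none hsb with ⟨hy0, -⟩
      exact absurd hne (by simp [hx0, hy0])
    · -- x axis unbounded, y axis bounded by b
      rcases steps_none hsa with ⟨hx0, hxl, hxr⟩
      have hb0 : 0 ≤ b := steps_nonneg hsb
      simp only [List.filterMap, List.min?, Option.getD]
      have hNb : ((b.toNat : Nat) : Int) = b := Int.toNat_of_nonneg hb0
      refine core_of ox oy xd yd sx sy b.toNat ?_ ?_ ?_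
      · intro k hk
        have hkb : (k : Int) < b := by omega
        have hy := steps_ok_of_lt hsb (Int.natCast_nonneg k) hkb
        refine ⟨by simp [hx0]; omega, by simp [hx0]; omega, hy.1, hy.2⟩
      · intro hc
        exact steps_stop hsb ⟨by rw [← hNb]; exact hc.2.2.1, by rw [← hNb]; exact hc.2.2.2⟩
      · have := steps_le hsb; omega
  · rcases hsb : stepsAxis oy yd sy with _ | b
    · -- y axis unbounded, x axis bounded by a
      rcases steps_none hsb with ⟨hy0, hyl, hyr⟩
      have ha0 : 0 ≤ a := steps_nonneg hsa
      simp only [List.filterMap, List.min?, Option.getD]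
      have hNa : ((a.toNat : Nat) : Int) = a := Int.toNat_of_nonneg ha0
      refine core_of ox oy xd yd sx sy a.toNat ?_ ?_ ?_
      · intro k hk
        have hka : (k : Int) < a := by omega
        have hx := steps_ok_of_lt hsa (Int.natCast_nonneg k) hka
        refine ⟨hx.1, hx.2, by simp [hy0]; omega, by simp [hy0]; omega⟩
      · intro hc
        exact steps_stop hsa ⟨by rw [← hNa]; exact hc.1, by rw [← hNa]; exact hc.2.1⟩
      · have := steps_le hsa; omega
    · -- both axes bounded: min a b
      have ha0 : 0 ≤ a := steps_nonneg hsa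
      have hb0 : 0 ≤ b := steps_nonneg hsb
      simp only [List.filterMap, List.min?, Option.getD]
      have hm0 : 0 ≤ min a b := le_min ha0 hb0
      have hNm : (((min a b).toNat : Nat) : Int) = min a b := Int.toNat_of_nonneg hm0
      refine core_of ox oy xd yd sx sy (min a b).toNat ?_ ?_ ?_
      · intro k hk
        have hkm : (k : Int) < min a b := by omega
        have hx := steps_ok_of_lt hsa (Int.natCast_nonneg k) (lt_of_lt_of_le hkm (min_le_left _ _))
        have hy := steps_ok_of_lt hsb (Int.natCast_nonneg k) (lt_of_lt_of_le hkm (min_le_right _ _))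
        exact ⟨hx.1, hx.2, hy.1, hy.2⟩
      · intro hc
        rcases le_total a b with hab | hab
        · have hNa : (((min a b).toNat : Nat) : Int) = a := by rw [hNm]; omega
          exact steps_stop hsa ⟨by rw [← hNa]; exact hc.1, by rw [← hNa]; exact hc.2.1⟩
        · have hNb : (((min a b).toNat : Nat) : Int) = b := by rw [hNm]; omega
          exact steps_stop hsb ⟨by rw [← hNb]; exact hc.2.2.1, by rw [← hNb]; exact hc.2.2.2⟩
      · have h1 := steps_le hsa
        have h2 : (min a b).toNat ≤ a.toNat := Int.toNat_le_toNat (min_le_left _ _)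
        omega

-- quotient by a positive exact divisor is zero only for a zero dividend
lemma quot_ne_zero {a g : Int} (hg : 0 < g) (hdvd : g ∣ a) (ha : a ≠ 0) :
    PySem.Int.floordiv a g ≠ 0 := by
  rw [PySem.Int.floordiv_eq_ediv_of_pos hg]
  intro h0
  have := Int.ediv_mul_cancel hdvd
  rw [h0] at this
  simp at this
  exact ha this.symm

-- ===== VERDICT (by name: the statement is the Claim_ definition above) =====
theorem loop_dir_spec : Claim_equal_loop_dir := by
  intro ox oy x y sx sy _ hpre
  unfold Spec_loop_dir loop_dir loop_dir_alt
  set g : Int := ((Int.gcd x y : Int)) with hg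
  have hgpos : 0 < g := by
    have : x ≠ 0 ∨ y ≠ 0 := by unfold Pre_loop_dir at hpre; tauto
    rw [hg]; exact_mod_cast Int.gcd_pos_iff.mpr this
  set xd := PySem.Int.floordiv x g with hxd
  set yd := PySem.Int.floordiv y g with hyd
  have hne : xd ≠ 0 ∨ yd ≠ 0 := by
    have : x ≠ 0 ∨ y ≠ 0 := by unfold Pre_loop_dir at hpre; tauto
    rcases this with h | h
    · exact Or.inl (quot_ne_zero hgpos (by rw [hg]; exact Int.gcd_dvd_left x y) h)
    · exact Or.inr (quot_ne_zero hgpos (by rw [hg]; exact Int.gcd_dvd_right x y) h)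
  have hne' : xd ≠ 0 ∨ yd ≠ 0 := hne
  exact main_core ox oy xd yd sx sy hne'
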